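-- pv_equiv track=rewrite | github.com/tushancse04/movie_recommend | assignments/01/COMP7118_A1_IslamMdMaminur/shingles.py | shingle2decimal
-- ===== SOURCE A (Python) =====
-- def shingle2decimal(shingle):
--     d = 0
--     cmap = {}
--     cmap['A'] = 0
--     cmap['C'] = 1
--     cmap['G'] = 2
--     cmap['T'] = 3
--     for i in range(len(shingle)):
--         d = d*4 + cmap[shingle[i]]
--     return d
-- ===== SOURCE B (Python) =====
-- def shingle2decimal(shingle):
--     cmap = {'A': 0, 'C': 1, 'G': 2, 'T': 3}
--     total = 0
--     p = 1
--     for c in reversed(shingle):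
--         total += cmap[c] * p
--         p *= 4
--     return total
-- ===== Notes on version B (the rewrite author's own statement) =====
-- stated objective: alternative
-- what changed: Replaces the Horner multiply-and-add accumulation over increasing indices with a reversed pass that sums each digit times an explicitly maintained power of 4.
import Mathlib
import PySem

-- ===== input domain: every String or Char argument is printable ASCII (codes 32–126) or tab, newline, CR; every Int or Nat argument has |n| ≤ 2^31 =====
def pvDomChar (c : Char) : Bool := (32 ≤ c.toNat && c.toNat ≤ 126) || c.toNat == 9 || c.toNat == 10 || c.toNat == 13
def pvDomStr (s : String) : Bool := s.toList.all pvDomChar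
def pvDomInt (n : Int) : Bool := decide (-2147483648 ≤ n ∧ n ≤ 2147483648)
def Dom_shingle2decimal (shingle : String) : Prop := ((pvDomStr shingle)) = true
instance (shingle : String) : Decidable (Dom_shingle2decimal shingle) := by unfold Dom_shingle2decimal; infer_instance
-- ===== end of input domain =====

-- B replaces A's Horner multiply-and-add accumulation by a reversed pass summing
-- digit × explicit power of 4 (objective: alternative decomposition, same cost).


-- ===== PORT A =====
-- cmap built exactly as in the Python (four inserts into an empty dict)
def cmapA : PySem.Dict Char Int :=
  ((((PySem.Dict.empty).insert 'A' 0).insert 'C' 1).insert 'G' 2).insert 'T' 3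

-- the loop 'for i in range(len(shingle)): d = d*4 + cmap[shingle[i]]' visits the
-- characters left to right; Pre_ guarantees every lookup succeeds (no KeyError),
-- so the lookup is getD with an unreachable default.
def shingle2decimal (shingle : String) : Int :=
  shingle.toList.foldl (fun d c => d * 4 + (cmapA.get? c).getD 0) 0

-- ===== PORT B =====
def cmapB : PySem.Dict Char Int :=
  PySem.Dict.ofList [('A', 0), ('C', 1), ('G', 2), ('T', 3)]

def shingle2decimal_alt (shingle : String) : Int :=
  (shingle.toList.reverse.foldl
    (fun (st : Int × Int) c => (st.1 + (cmapB.get? c).getD 0 * st.2, st.2 * 4))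
    (0, 1)).1

-- ===== PRECONDITION & SPEC =====
-- Pre_ excludes exactly the strings containing a character other than A/C/G/T,
-- on which the Python A raises KeyError.
def Pre_shingle2decimal (shingle : String) : Prop :=
  (shingle.toList.all (fun c => c == 'A' || c == 'C' || c == 'G' || c == 'T')) = true
instance (shingle : String) : Decidable (Pre_shingle2decimal shingle) := by
  unfold Pre_shingle2decimal; infer_instance

def pvWitness_shingle2decimal : String := "GATTACA"

def Spec_shingle2decimal (shingle : String) (out : Int) : Prop := out = shingle2decimal_alt shingle
instance (shingle : String) (out : Int) : Decidable (Spec_shingle2decimal shingle out) := by unfold Spec_shingle2decimal; infer_instance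

-- ===== CLAIM (what is proved, stated in full; the proofs are below) =====
def Claim_equal_shingle2decimal : Prop := ∀ (shingle : String), Dom_shingle2decimal shingle → Pre_shingle2decimal shingle → Spec_shingle2decimal shingle (shingle2decimal shingle)

-- ===== LEMMAS AND PROOFS =====

-- the two dicts agree as lookup tables
theorem cmap_dicts : cmapB = cmapA := by decide

theorem cmap_eq (c : Char) : (cmapB.get? c).getD 0 = (cmapA.get? c).getD 0 := by
  rw [cmap_dicts]

-- Horner fold with an arbitrary accumulator
theorem hornerA (l : List Char) : ∀ d : Int,
    l.foldl (fun d c => d * 4 + (cmapA.get? c).getD 0) d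
      = d * 4 ^ l.length + l.foldl (fun d c => d * 4 + (cmapA.get? c).getD 0) 0 := by
  induction l with
  | nil => intro d; simp
  | cons c l ih =>
      intro d
      simp only [List.foldl_cons, List.length_cons, ih (d * 4 + (cmapA.get? c).getD 0),
        ih (0 * 4 + (cmapA.get? c).getD 0)]
      ring

-- B's pair fold computes the Horner value of the reverse of its input
theorem foldB (l : List Char) : ∀ t p : Int,
    (l.foldl (fun (st : Int × Int) c => (st.1 + (cmapB.get? c).getD 0 * st.2, st.2 * 4)) (t, p)).1
      = t + p * l.reverse.foldl (fun d c => d * 4 + (cmapA.get? c).getD 0) 0 := by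
  induction l with
  | nil => intro t p; simp
  | cons c l ih =>
      intro t p
      simp only [List.foldl_cons, List.reverse_cons, List.foldl_append, List.foldl_cons,
        List.foldl_nil, ih]
      rw [hornerA l.reverse, cmap_eq]
      ring

-- ===== VERDICT (by name: the statement is the Claim_ definition above) =====
theorem shingle2decimal_spec : Claim_equal_shingle2decimal := by
  intro s _ _
  unfold Spec_shingle2decimal shingle2decimal shingle2decimal_alt
  rw [foldB]
  simp
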